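-- pv_equiv track=rewrite | github.com/Anonymity-0/ReinforcementRouting | visualization/test_tle_visual.py | get_orbital_plane
-- ===== SOURCE A (Python) =====
-- ORBITAL_PLANES = {
--     1: [145, 143, 140, 148, 150, 153, 144, 149, 146, 142, 157],
--     2: [134, 141, 137, 116, 135, 151, 120, 113, 138, 130, 131],
--     3: [117, 168, 180, 123, 126, 167, 171, 121, 118, 172, 173],
--     4: [119, 122, 128, 107, 132, 129, 100, 133, 125, 136, 139],
--     5: [158, 160, 159, 163, 165, 166, 154, 164, 108, 155, 156],  # 注意105/164合并
--     6: [102, 112, 104, 114, 103, 109, 106, 152, 147, 110, 111]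
-- }
--
-- def get_orbital_plane(sat_name: str) -> int:
--     """获取卫星所属的轨道面编号"""
--     # 从卫星名称中提取编号
--     try:
--         sat_number = int(sat_name.split()[1])
--         for plane_num, satellites in ORBITAL_PLANES.items():
--             if sat_number in satellites:
--                 return plane_num
--     except:
--         pass
--     return 0  # 如果找不到对应的轨道面，返回0
-- ===== SOURCE B (Python) =====
-- ORBITAL_PLANES = {
--     1: [145, 143, 140, 148, 150, 153, 144, 149, 146, 142, 157],
--     2: [134, 141, 137, 116, 135, 151, 120, 113, 138, 130, 131],
--     3: [117, 168, 180, 123, 126, 167, 171, 121, 118, 172, 173],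
--     4: [119, 122, 128, 107, 132, 129, 100, 133, 125, 136, 139],
--     5: [158, 160, 159, 163, 165, 166, 154, 164, 108, 155, 156],
--     6: [102, 112, 104, 114, 103, 109, 106, 152, 147, 110, 111]
-- }
--
-- # One sorted flat table of (satellite number, plane) pairs, built once;
-- # each call is a hand-written binary search over it instead of scanning the six lists.
-- _PAIRS = sorted((s, p) for p, sats in ORBITAL_PLANES.items() for s in sats)
--
-- def get_orbital_plane(sat_name: str) -> int:
--     """获取卫星所属的轨道面编号"""
--     try:
--         n = int(sat_name.split()[1])
--     except:
--         return 0
--     lo, hi = 0, len(_PAIRS)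
--     while lo < hi:
--         mid = (lo + hi) // 2
--         if _PAIRS[mid][0] < n:
--             lo = mid + 1
--         else:
--             hi = mid
--     if lo < len(_PAIRS) and _PAIRS[lo][0] == n:
--         return _PAIRS[lo][1]
--     return 0
-- ===== Notes on version B (the rewrite author's own statement) =====
-- stated objective: alternative
-- what changed: Replaces the per-call scan over the six plane lists with one module-level sorted flat table of (satellite number, plane) pairs and a hand-written binary search (lower-bound loop) per call.
import Mathlib
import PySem

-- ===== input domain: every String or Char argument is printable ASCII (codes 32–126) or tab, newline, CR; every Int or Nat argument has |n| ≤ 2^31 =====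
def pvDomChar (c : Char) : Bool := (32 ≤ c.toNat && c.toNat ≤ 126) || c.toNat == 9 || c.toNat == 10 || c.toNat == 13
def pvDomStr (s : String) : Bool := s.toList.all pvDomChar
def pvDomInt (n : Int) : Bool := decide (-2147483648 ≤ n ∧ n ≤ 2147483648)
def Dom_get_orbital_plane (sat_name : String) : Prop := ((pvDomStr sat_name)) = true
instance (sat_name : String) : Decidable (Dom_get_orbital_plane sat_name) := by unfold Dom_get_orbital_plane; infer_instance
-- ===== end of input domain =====

-- B replaces A's per-call scan over the six plane lists with one sorted flat
-- (number, plane) table built once and a binary search per call (objective: alternative).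


-- shared module-level data (same literal in both Pythons)
def ORBITAL_PLANES : List (Int × List Int) :=
  [(1, [145, 143, 140, 148, 150, 153, 144, 149, 146, 142, 157]),
   (2, [134, 141, 137, 116, 135, 151, 120, 113, 138, 130, 131]),
   (3, [117, 168, 180, 123, 126, 167, 171, 121, 118, 172, 173]),
   (4, [119, 122, 128, 107, 132, 129, 100, 133, 125, 136, 139]),
   (5, [158, 160, 159, 163, 165, 166, 154, 164, 108, 155, 156]),
   (6, [102, 112, 104, 114, 103, 109, 106, 152, 147, 110, 111])]

-- ===== PORT A =====
-- A's for-loop over ORBITAL_PLANES.items() with 'sat_number in satellites', falling through to 0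
def planeLoop : List (Int × List Int) → Int → Int
  | [], _ => 0
  | (p, sats) :: rest, n => if n ∈ sats then p else planeLoop rest n

def get_orbital_plane (sat_name : String) : Int :=
  -- try: sat_number = int(sat_name.split()[1]); for-loop; except: pass; return 0
  match (PySem.List.pyGet? (PySem.Str.split₀ sat_name) 1).bind PySem.Int.ofStr? with
  | some n => planeLoop ORBITAL_PLANES n
  | none => 0

-- ===== PORT B =====
-- _PAIRS = sorted((s, p) for p, sats in ORBITAL_PLANES.items() for s in sats)
def PAIRS : List (Int × Int) :=
  PySem.List.sorted2 (ORBITAL_PLANES.flatMap (fun q => q.2.map (fun s => (s, q.1))))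
    Prod.fst Prod.snd

-- the 'while lo < hi' lower-bound loop, fuel = hi - lo at the first call (range shrinks each step)
def bsLoop (n : Int) : Nat → Nat → Nat → Nat
  | 0, lo, _ => lo
  | fuel + 1, lo, hi =>
    if lo < hi then
      let mid := (lo + hi) / 2
      if (PAIRS.getD mid (0, 0)).1 < n then bsLoop n fuel (mid + 1) hi
      else bsLoop n fuel lo mid
    else lo

-- the body after the try/except: binary search, then the final membership check
def lookupB (n : Int) : Int :=
  let lo := bsLoop n PAIRS.length 0 PAIRS.length
  if lo < PAIRS.length ∧ (PAIRS.getD lo (0, 0)).1 = n then (PAIRS.getD lo (0, 0)).2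
  else 0

def get_orbital_plane_alt (sat_name : String) : Int :=
  match (PySem.List.pyGet? (PySem.Str.split₀ sat_name) 1).bind PySem.Int.ofStr? with
  | some n => lookupB n
  | none => 0

-- ===== PRECONDITION & SPEC =====
def Spec_get_orbital_plane (sat_name : String) (out : Int) : Prop := out = get_orbital_plane_alt sat_name
instance (sat_name : String) (out : Int) : Decidable (Spec_get_orbital_plane sat_name out) := by unfold Spec_get_orbital_plane; infer_instance

-- ===== CLAIM (what is proved, stated in full; the proofs are below) =====
def Claim_equal_get_orbital_plane : Prop := ∀ (sat_name : String), Dom_get_orbital_plane sat_name → Spec_get_orbital_plane sat_name (get_orbital_plane sat_name)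

-- ===== LEMMAS AND PROOFS =====

-- every satellite number in the table lies in [100, 180]
theorem planes_bounded : ∀ q ∈ ORBITAL_PLANES, ∀ s ∈ q.2, 100 ≤ s ∧ s ≤ 180 := by decide

theorem getD_mem_pairs (i : Nat) (hi : i < PAIRS.length) : PAIRS.getD i (0, 0) ∈ PAIRS := by
  rw [List.getD_eq_getElem _ _ hi]
  exact List.getElem_mem hi

theorem pairs_bounded : ∀ q ∈ PAIRS, 100 ≤ q.1 ∧ q.1 ≤ 180 := by decide

-- n below every key in [lo,hi): the loop always goes left and returns lo
theorem bsLoop_all_ge (n : Int) :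
    ∀ fuel lo hi, (∀ i, lo ≤ i → i < hi → ¬ (PAIRS.getD i (0, 0)).1 < n) →
      bsLoop n fuel lo hi = lo := by
  intro fuel
  induction fuel with
  | zero => intro lo hi _; rfl
  | succ f ih =>
    intro lo hi h
    simp only [bsLoop]
    split
    · rename_i hlt
      rw [if_neg (h ((lo + hi) / 2) (by omega) (by omega))]
      exact ih lo ((lo + hi) / 2) (fun i h1 h2 => h i h1 (by omega))
    · rfl

-- n above every key in [lo,hi): the loop always goes right and returns hi (given enough fuel)
theorem bsLoop_all_lt (n : Int) :
    ∀ fuel lo hi, lo ≤ hi → hi - lo ≤ fuel → (∀ i, lo ≤ i → i < hi → (PAIRS.getD i (0, 0)).1 < n) →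
      bsLoop n fuel lo hi = hi := by
  intro fuel
  induction fuel with
  | zero => intro lo hi hle hf _; simp only [bsLoop]; omega
  | succ f ih =>
    intro lo hi hle hf h
    simp only [bsLoop]
    split
    · rename_i hlt
      rw [if_pos (h ((lo + hi) / 2) (by omega) (by omega))]
      exact ih ((lo + hi) / 2 + 1) hi (by omega) (by omega) (fun i h1 h2 => h i (by omega) h2)
    · omega

-- A's loop returns 0 for numbers outside [100, 180]
theorem planeLoop_outside (n : Int) (hn : n < 100 ∨ 180 < n) :
    planeLoop ORBITAL_PLANES n = 0 := by
  have hb := planes_bounded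
  revert hb
  generalize ORBITAL_PLANES = ps
  intro hb
  induction ps with
  | nil => rfl
  | cons q rest ih =>
    obtain ⟨p, sats⟩ := q
    simp only [planeLoop]
    rw [if_neg]
    · exact ih (fun q hq => hb q (List.mem_cons_of_mem _ hq))
    · intro hmem
      have := hb (p, sats) List.mem_cons_self n hmem
      omega

-- the two per-number lookups agree on the whole finite range the table covers
theorem inside_range : ∀ k ∈ List.range 81, lookupB (100 + (k : Int)) = planeLoop ORBITAL_PLANES (100 + (k : Int)) := by decide

-- the central per-number equality
theorem key_eq (n : Int) : lookupB n = planeLoop ORBITAL_PLANES n := by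
  by_cases hlow : n < 100
  · have hloop : bsLoop n PAIRS.length 0 PAIRS.length = 0 := by
      apply bsLoop_all_ge
      intro i _ hi
      have hmem : PAIRS.getD i (0, 0) ∈ PAIRS := getD_mem_pairs _ (by omega)
      have := pairs_bounded _ hmem
      omega
    have h0 : 0 < PAIRS.length := by decide
    rw [lookupB, planeLoop_outside n (Or.inl hlow)]
    simp only [hloop]
    rw [if_neg]
    rintro ⟨_, heq⟩
    have hmem : PAIRS.getD 0 (0, 0) ∈ PAIRS := getD_mem_pairs 0 h0
    have := pairs_bounded _ hmem
    omega
  · by_cases hhigh : 180 < n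
    · have hloop : bsLoop n PAIRS.length 0 PAIRS.length = PAIRS.length := by
        apply bsLoop_all_lt _ _ _ _ (by omega) (by omega)
        intro i _ hi
        have hmem : PAIRS.getD i (0, 0) ∈ PAIRS := getD_mem_pairs _ (by omega)
        have := pairs_bounded _ hmem
        omega
      rw [lookupB, planeLoop_outside n (Or.inr hhigh)]
      simp only [hloop]
      rw [if_neg]
      rintro ⟨hlt, _⟩
      omega
    · -- 100 ≤ n ≤ 180: n = 100 + k with k < 81, finite check
      have hk : n = 100 + ((n - 100).toNat : Int) := by omega
      have hkr : (n - 100).toNat ∈ List.range 81 := by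
        rw [List.mem_range]; omega
      rw [hk]
      exact inside_range _ hkr

-- ===== VERDICT (by name: the statement is the Claim_ definition above) =====
theorem get_orbital_plane_spec : Claim_equal_get_orbital_plane := by
  intro s _
  show get_orbital_plane s = get_orbital_plane_alt s
  unfold get_orbital_plane get_orbital_plane_alt
  cases (PySem.List.pyGet? (PySem.Str.split₀ s) 1).bind PySem.Int.ofStr? with
  | none => rfl
  | some n => exact (key_eq n).symm
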